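-- pv_equiv track=rewrite | github.com/mayank88-py/leetcode-top-interview-150 | math/066_plus_one.py | plus_one_carry_propagation
-- ===== SOURCE A (Python) =====
-- def plus_one_carry_propagation(digits):
--     """
--     Approach 2: Explicit Carry Propagation
--     Time Complexity: O(n)
--     Space Complexity: O(1) - excluding output array
--
--     Explicitly handle carry propagation through the digits.
--     """
--     carry = 1
--     result = digits[:]
--
--     for i in range(len(result) - 1, -1, -1):
--         total = result[i] + carry
--         result[i] = total % 10
--         carry = total // 10
--
--         if carry == 0:
--             break
--
--     # If there's still a carry, prepend it
--     if carry:
--         result = [carry] + result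
--
--     return result
-- ===== SOURCE B (Python) =====
-- def plus_one_carry_propagation(digits):
--     # Divide and conquer instead of a sequential carry loop: a carry entering
--     # from the right is pushed into the right half first, and its outgoing
--     # carry into the left half; a zero carry leaves a block untouched.
--     def add_from_right(ds, carry):
--         if carry == 0:
--             return 0, ds[:]
--         n = len(ds)
--         if n == 0:
--             return carry, []
--         if n == 1:
--             total = ds[0] + carry
--             return total // 10, [total % 10]
--         mid = n // 2
--         c_right, right = add_from_right(ds[mid:], carry)
--         c_left, left = add_from_right(ds[:mid], c_right)
--         return c_left, left + right
--     carry, result = add_from_right(digits, 1)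
--     return ([carry] + result) if carry else result
-- ===== Notes on version B (the rewrite author's own statement) =====
-- stated objective: alternative
-- what changed: A walks the digits right-to-left in a single carry loop that mutates a copied list and breaks when the carry dies; B is a divide-and-conquer recursion that splits the array in half, pushes the incoming carry into the right half and its outgoing carry into the left half, leaving any block with zero incoming carry untouched.
import Mathlib
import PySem

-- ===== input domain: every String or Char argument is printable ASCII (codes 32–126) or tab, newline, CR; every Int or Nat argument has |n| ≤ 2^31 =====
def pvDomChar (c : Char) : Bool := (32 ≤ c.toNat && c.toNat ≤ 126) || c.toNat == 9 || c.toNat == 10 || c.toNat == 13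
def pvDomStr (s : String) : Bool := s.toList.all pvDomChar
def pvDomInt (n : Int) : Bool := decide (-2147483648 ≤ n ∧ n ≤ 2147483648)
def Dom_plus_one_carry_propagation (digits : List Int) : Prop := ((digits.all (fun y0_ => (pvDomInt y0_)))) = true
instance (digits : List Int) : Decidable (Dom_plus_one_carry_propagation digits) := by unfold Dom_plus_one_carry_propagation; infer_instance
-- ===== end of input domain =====

-- B replaces A's sequential right-to-left carry loop with in-place mutation by a
-- divide-and-conquer split: the carry is pushed into the right half, its outgoing
-- carry into the left half, and a zero carry leaves a block untouched (alternative
-- decomposition, same cost up to the slicing).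

-- ===== PORT A =====
-- A's for-loop over i = len-1 .. 0 with in-place mutation and break, as a
-- recursion on the number of remaining indices n (current index i = n - 1);
-- result[i] is read with getD, exact here since the index is always in range.
def pvALoop : Nat → List Int → Int → List Int × Int
  | 0, result, carry => (result, carry)
  | n + 1, result, carry =>
    let total := result.getD n 0 + carry
    let result' := result.set n (PySem.Int.mod total 10)
    let carry' := PySem.Int.floordiv total 10
    if carry' = 0 then (result', carry') else pvALoop n result' carry'

def plus_one_carry_propagation (digits : List Int) : List Int :=
  let p := pvALoop digits.length digits 1
  if p.2 ≠ 0 then p.2 :: p.1 else p.1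

-- ===== PORT B =====
-- Source B's add_from_right: divide and conquer on the list, with a Nat fuel (= ds.length\n-- at the top call) as the structural totality guard; ds[mid:] = drop mid,
-- ds[:mid] = take mid (exact for 0 ≤ mid); ds[0] read with getD, exact since
-- the list is nonempty there; divmod pieces via PySem floordiv/mod.
def pvAddFromRight : Nat → List Int → Int → Int × List Int
  | 0, ds, carry => (carry, ds)   -- fuel never runs out: fuel starts at ds.length and halves stay below it
  | fuel + 1, ds, carry =>
    if carry = 0 then (0, ds)
    else if ds.length = 0 then (carry, [])
    else if ds.length = 1 then
      let total := ds.getD 0 0 + carry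
      (PySem.Int.floordiv total 10, [PySem.Int.mod total 10])
    else
      let mid := ds.length / 2
      let pr := pvAddFromRight fuel (ds.drop mid) carry
      let pl := pvAddFromRight fuel (ds.take mid) pr.1
      (pl.1, pl.2 ++ pr.2)

def plus_one_carry_propagation_alt (digits : List Int) : List Int :=
  let p := pvAddFromRight digits.length digits 1
  if p.1 ≠ 0 then p.1 :: p.2 else p.2

-- ===== PRECONDITION & SPEC =====
def Spec_plus_one_carry_propagation (digits : List Int) (out : List Int) : Prop := out = plus_one_carry_propagation_alt digits
instance (digits : List Int) (out : List Int) : Decidable (Spec_plus_one_carry_propagation digits out) := by unfold Spec_plus_one_carry_propagation; infer_instance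

-- ===== CLAIM (what is proved, stated in full; the proofs are below) =====
def Claim_equal_plus_one_carry_propagation : Prop := ∀ (digits : List Int), Dom_plus_one_carry_propagation digits → Spec_plus_one_carry_propagation digits (plus_one_carry_propagation digits)

-- ===== LEMMAS AND PROOFS =====

-- reference sequential recursion: process the tail first, bubble the carry up.
def pvSeq : List Int → Int → Int × List Int
  | [], c => (c, [])
  | d :: ds, c =>
    let p := pvSeq ds c
    if p.1 = 0 then (0, d :: p.2)
    else (PySem.Int.floordiv (d + p.1) 10, PySem.Int.mod (d + p.1) 10 :: p.2)

theorem pvSeq_zero (ds : List Int) : pvSeq ds 0 = (0, ds) := by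
  induction ds with
  | nil => rfl
  | cons d ds ih => simp [pvSeq, ih]

theorem pvSeq_append (xs ys : List Int) (c : Int) :
    pvSeq (xs ++ ys) c =
      ((pvSeq xs (pvSeq ys c).1).1, (pvSeq xs (pvSeq ys c).1).2 ++ (pvSeq ys c).2) := by
  induction xs with
  | nil => simp [pvSeq]
  | cons x xs ih =>
      simp only [List.cons_append, pvSeq, ih]
      by_cases h : (pvSeq xs (pvSeq ys c).1).1 = 0 <;> simp [h]

-- B's divide and conquer computes the sequential recursion.
theorem pvAddFromRight_eq_seq (fuel : Nat) (ds : List Int) (c : Int)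
    (h : ds.length ≤ fuel) : pvAddFromRight fuel ds c = pvSeq ds c := by
  induction fuel generalizing ds c with
  | zero =>
      rw [List.length_eq_zero_iff.mp (Nat.le_zero.mp h)]
      simp [pvAddFromRight, pvSeq]
  | succ fuel ih =>
      simp only [pvAddFromRight]
      split_ifs with hc h0 h1
      · rw [hc, pvSeq_zero]
      · rw [List.length_eq_zero_iff.mp h0]; simp [pvSeq]
      · obtain ⟨d, hd⟩ := List.length_eq_one_iff.mp h1
        subst hd; simp [pvSeq, hc, List.getD]
      · rw [ih (ds.drop (ds.length / 2)) c (by simp; omega),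
            ih (ds.take (ds.length / 2)) _ (by simp; omega)]
        conv_rhs => rw [← List.take_append_drop (ds.length / 2) ds]
        rw [pvSeq_append]

-- A's loop over indices n-1..0 never touches a tail appended beyond index n-1.
theorem pvALoop_append (n : Nat) (ys zs : List Int) (c : Int) (h : n ≤ ys.length) :
    pvALoop n (ys ++ zs) c = ((pvALoop n ys c).1 ++ zs, (pvALoop n ys c).2) := by
  induction n generalizing ys c with
  | zero => simp [pvALoop]
  | succ n ih =>
      simp only [pvALoop]
      rw [List.getD_append _ _ _ _ (by omega), List.set_append_left _ _ (by omega)]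
      split_ifs with hc
      · rfl
      · rw [ih _ _ (by simp; omega)]

-- A's loop, entered with a nonzero carry, computes the sequential recursion.
theorem pvALoop_eq_seq (ys : List Int) (c : Int) (hc : c ≠ 0) :
    pvALoop ys.length ys c = ((pvSeq ys c).2, (pvSeq ys c).1) := by
  induction ys using List.reverseRecOn generalizing c with
  | nil => simp [pvALoop, pvSeq]
  | append_singleton ys d ih =>
      have hlen : (ys ++ [d]).length = ys.length + 1 := by simp
      rw [hlen]
      simp only [pvALoop]
      have hget : (ys ++ [d]).getD ys.length 0 = d := by simp
      have hset : (ys ++ [d]).set ys.length (PySem.Int.mod (d + c) 10)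
          = ys ++ [PySem.Int.mod (d + c) 10] := by
        rw [List.set_append_right _ _ (le_refl _)]; simp
      rw [hget, hset, pvSeq_append]
      have hseq1 : pvSeq [d] c
          = (PySem.Int.floordiv (d + c) 10, [PySem.Int.mod (d + c) 10]) := by
        simp [pvSeq, hc]
      rw [hseq1]
      set q := PySem.Int.floordiv (d + c) 10 with hq
      by_cases hq0 : q = 0
      · rw [if_pos hq0, hq0, pvSeq_zero]
      · rw [if_neg hq0, pvALoop_append ys.length ys _ q (le_refl _), ih q hq0]

-- ===== VERDICT (by name: the statement is the Claim_ definition above) =====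
theorem plus_one_carry_propagation_spec : Claim_equal_plus_one_carry_propagation := by
  intro digits _
  unfold Spec_plus_one_carry_propagation plus_one_carry_propagation plus_one_carry_propagation_alt
  rw [pvALoop_eq_seq digits 1 one_ne_zero, pvAddFromRight_eq_seq digits.length digits 1 (le_refl _)]
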